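-- pv_equiv track=rewrite | github.com/daniel-reich/ubiquitous-fiesta | WixXhsdqcNHe3vTn3_23.py | how_bad
-- ===== SOURCE A (Python) =====
-- def how_bad(n):
--   u = bin(n)[2:].count('1')
--   a = []
--   if u % 2 == 0:
--     a = ['Evil']
--   else:
--     a = ['Odious']
--   p = True
--   for i in range(2, u):
--     if u % i == 0:
--       p = False
--       break
--   if p and (u != 1):
--     a.append('Pernicious')
--   return a
-- ===== SOURCE B (Python) =====
-- def how_bad(n):
--   m, u = abs(n), 0
--   while m:
--     m &= m - 1
--     u += 1
--   label = 'Evil' if u % 2 == 0 else 'Odious'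
--   if u != 1 and all(u % d for d in range(2, u) if d * d <= u):
--     return [label, 'Pernicious']
--   return [label]
-- ===== Notes on version B (the rewrite author's own statement) =====
-- stated objective: alternative
-- what changed: Popcount is computed with Kernighan's bit-clearing loop (m &= m-1) instead of a binary-string count, primality of the popcount is decided by an all(...) over divisors filtered to d*d<=u instead of A's break-on-divisor scan over all of range(2,u), and the result list is built as one literal instead of an append.
import Mathlib
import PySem

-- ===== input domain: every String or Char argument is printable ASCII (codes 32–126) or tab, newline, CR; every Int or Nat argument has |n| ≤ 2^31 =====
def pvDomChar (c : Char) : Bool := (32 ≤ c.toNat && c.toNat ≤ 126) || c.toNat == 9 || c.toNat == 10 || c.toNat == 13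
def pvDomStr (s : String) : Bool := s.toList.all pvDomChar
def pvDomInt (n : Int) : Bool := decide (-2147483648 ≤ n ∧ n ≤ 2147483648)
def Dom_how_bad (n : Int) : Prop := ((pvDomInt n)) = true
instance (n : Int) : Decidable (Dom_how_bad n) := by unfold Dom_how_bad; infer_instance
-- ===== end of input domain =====

-- B replaces the binary-string popcount by Kernighan's bit-clearing loop, the break-on-divisor
-- scan over range(2,u) by an all(...) over divisors filtered to d*d<=u, and the append by a
-- single list literal (alternative decomposition; same observable behaviour, incl. u=0 and u=1).

-- ===== PORT A =====
-- bin(n)[2:].count('1') = popcount |n| (for negative n, '[2:]' leaves 'b…'; 'b' is not '1'):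
-- exact hand port of the binary-digit count.
def pvPopcount (m : Nat) : Nat :=
  if m = 0 then 0 else pvPopcount (m / 2) + m % 2
decreasing_by exact Nat.div_lt_self (Nat.pos_of_ne_zero (by assumption)) (by omega)

-- A's for-loop over range(2, u) with break
def pvTrialA (u : Nat) : List Nat → Bool
  | [] => true
  | i :: t => if u % i == 0 then false else pvTrialA u t

-- A's body after computing u
def pvCoreA (u : Nat) : List String :=
  let a := if u % 2 == 0 then ["Evil"] else ["Odious"]
  let p := pvTrialA u (List.range' 2 (u - 2))
  if p && !(u == 1) then a ++ ["Pernicious"] else a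

def how_bad (n : Int) : List String :=
  pvCoreA (pvPopcount n.natAbs)

-- ===== PORT B =====
-- B's `while m: m &= m - 1; u += 1` loop (abs(n) first: Python's & on a negative int is
-- two's-complement, but B takes abs before the loop, so the Nat port is exact)
def pvKernighan (m u : Nat) : Nat :=
  if m = 0 then u else pvKernighan (m &&& (m - 1)) (u + 1)
decreasing_by
  exact Nat.lt_of_le_of_lt Nat.and_le_right
    (Nat.sub_lt (Nat.pos_of_ne_zero (by assumption)) (by omega))

-- B's body after the loop: `u != 1 and all(u % d for d in range(2, u) if d * d <= u)`
def pvCoreB (u : Nat) : List String :=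
  let label := if u % 2 == 0 then "Evil" else "Odious"
  if u != 1 && (((List.range' 2 (u - 2)).filter (fun d => decide (d * d ≤ u))).all
      fun d => u % d != 0) then
    [label, "Pernicious"]
  else
    [label]

def how_bad_alt (n : Int) : List String :=
  pvCoreB (pvKernighan n.natAbs 0)

-- ===== PRECONDITION & SPEC =====
def Spec_how_bad (n : Int) (out : List String) : Prop := out = how_bad_alt n
instance (n : Int) (out : List String) : Decidable (Spec_how_bad n out) := by unfold Spec_how_bad; infer_instance

-- ===== CLAIM (what is proved, stated in full; the proofs are below) =====
def Claim_equal_how_bad : Prop := ∀ (n : Int), Dom_how_bad n → Spec_how_bad n (how_bad n)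

-- ===== LEMMAS AND PROOFS =====

theorem pop_even (k : Nat) : pvPopcount (2 * k) = pvPopcount k := by
  rcases Nat.eq_zero_or_pos k with h | h
  · simp [h]
  · have hne : 2 * k ≠ 0 := by omega
    have hdiv : 2 * k / 2 = k := by omega
    have hmod : 2 * k % 2 = 0 := by omega
    rw [pvPopcount, if_neg hne, hdiv, hmod]
    omega

theorem pop_odd (k : Nat) : pvPopcount (2 * k + 1) = pvPopcount k + 1 := by
  have hne : 2 * k + 1 ≠ 0 := by omega
  have hdiv : (2 * k + 1) / 2 = k := by omega
  have hmod : (2 * k + 1) % 2 = 1 := by omega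
  rw [pvPopcount, if_neg hne, hdiv, hmod]

theorem odd_and (k : Nat) : (2 * k + 1) &&& (2 * k) = 2 * k := by
  have h := Nat.bitwise_bit (f := and) (a := true) (m := k) (b := false) (n := k)
  have h2 : k &&& k = k := Nat.and_self k
  simp [Nat.bit, HAnd.hAnd, AndOp.and, Nat.land] at h h2 ⊢
  omega

theorem even_and (k j : Nat) : (2 * k) &&& (2 * j + 1) = 2 * (k &&& j) := by
  have h := Nat.bitwise_bit (f := and) (a := false) (m := k) (b := true) (n := j)
  simp [Nat.bit, HAnd.hAnd, AndOp.and, Nat.land] at h ⊢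
  omega

-- clearing the lowest set bit removes exactly one 1-bit
theorem kern_key : ∀ m : Nat, m ≠ 0 → pvPopcount (m &&& (m - 1)) + 1 = pvPopcount m := by
  intro m
  induction m using Nat.strong_induction_on with
  | _ m ih =>
    intro hm
    rcases Nat.even_or_odd m with ⟨k, hk⟩ | ⟨k, hk⟩
    · -- m = 2k, k > 0; m-1 = 2(k-1)+1
      have hkpos : 0 < k := by omega
      have hsub : m - 1 = 2 * (k - 1) + 1 := by omega
      have hand : m &&& (m - 1) = 2 * (k &&& (k - 1)) := by
        rw [hsub, show m = 2 * k by omega, even_and]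
      have ihk := ih k (by omega) (by omega)
      rw [hand, pop_even, show m = 2 * k by omega, pop_even]
      exact ihk
    · -- m = 2k+1; m-1 = 2k
      have hsub : m - 1 = 2 * k := by omega
      have hand : m &&& (m - 1) = 2 * k := by
        rw [hsub, show m = 2 * k + 1 by omega, odd_and]
      rw [hand, pop_even, show m = 2 * k + 1 by omega, pop_odd]

theorem kern_eq : ∀ m u : Nat, pvKernighan m u = pvPopcount m + u := by
  intro m
  induction m using Nat.strong_induction_on with
  | _ m ih =>
    intro u
    rw [pvKernighan]
    split
    · simp [*, pvPopcount]
    · have hm : m ≠ 0 := by assumption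
      have hlt : m &&& (m - 1) < m :=
        Nat.lt_of_le_of_lt Nat.and_le_right (Nat.sub_lt (Nat.pos_of_ne_zero hm) (by omega))
      rw [ih _ hlt]
      have := kern_key m hm
      omega

theorem pvPopcount_le {k m : Nat} (h : m < 2 ^ k) : pvPopcount m ≤ k := by
  induction k generalizing m with
  | zero =>
    have : m = 0 := by omega
    simp [this, pvPopcount]
  | succ k ih =>
    rw [pvPopcount]
    split
    · omega
    · have h2 : m / 2 < 2 ^ k := by
        have : 2 ^ (k + 1) = 2 * 2 ^ k := by ring
        omega
      have := ih h2
      omega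

theorem core_eq : ∀ u < 33, pvCoreA u = pvCoreB u := by decide

-- ===== VERDICT (by name: the statement is the Claim_ definition above) =====
theorem how_bad_spec : Claim_equal_how_bad := by
  intro n hd
  unfold Spec_how_bad how_bad how_bad_alt
  rw [kern_eq, Nat.add_zero]
  apply core_eq
  have hb : n.natAbs < 2 ^ 32 := by
    unfold Dom_how_bad pvDomInt at hd
    simp at hd
    omega
  have := pvPopcount_le hb
  omega
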